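-- pv_equiv track=rewrite | github.com/elcuervo/gliner | onnx/decoder.py | build_pos_to_word_index
-- ===== SOURCE A (Python) =====
-- from typing import Dict, List, Mapping, Optional, Sequence, Tuple
--
-- def build_pos_to_word_index(word_ids: List[Optional[int]], text_start_combined: int) -> List[Optional[int]]:
--     mapping: List[Optional[int]] = [None] * len(word_ids)
--     seen: Dict[int, bool] = {}
--     for idx, word_id in enumerate(word_ids):
--         if word_id is None or word_id in seen:
--             continue
--         seen[word_id] = True
--         if word_id >= text_start_combined:
--             mapping[idx] = word_id - text_start_combined
--     return mapping
-- ===== SOURCE B (Python) =====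
-- from typing import Dict, List, Optional
--
-- def build_pos_to_word_index(word_ids: List[Optional[int]], text_start_combined: int) -> List[Optional[int]]:
--     first_idx: Dict[int, int] = {}
--     for idx, word_id in enumerate(word_ids):
--         if word_id is not None and word_id not in first_idx:
--             first_idx[word_id] = idx
--     mapping: List[Optional[int]] = [None] * len(word_ids)
--     for word_id, idx in first_idx.items():
--         if word_id >= text_start_combined:
--             mapping[idx] = word_id - text_start_combined
--     return mapping
-- ===== Notes on version B (the rewrite author's own statement) =====
-- stated objective: alternative
-- what changed: Splits A's single combined pass into two phases: a first pass builds a dict of each word id's first-occurrence index, then a separate emit pass over the dict's items writes the offset values into a preallocated list.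
import Mathlib
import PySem

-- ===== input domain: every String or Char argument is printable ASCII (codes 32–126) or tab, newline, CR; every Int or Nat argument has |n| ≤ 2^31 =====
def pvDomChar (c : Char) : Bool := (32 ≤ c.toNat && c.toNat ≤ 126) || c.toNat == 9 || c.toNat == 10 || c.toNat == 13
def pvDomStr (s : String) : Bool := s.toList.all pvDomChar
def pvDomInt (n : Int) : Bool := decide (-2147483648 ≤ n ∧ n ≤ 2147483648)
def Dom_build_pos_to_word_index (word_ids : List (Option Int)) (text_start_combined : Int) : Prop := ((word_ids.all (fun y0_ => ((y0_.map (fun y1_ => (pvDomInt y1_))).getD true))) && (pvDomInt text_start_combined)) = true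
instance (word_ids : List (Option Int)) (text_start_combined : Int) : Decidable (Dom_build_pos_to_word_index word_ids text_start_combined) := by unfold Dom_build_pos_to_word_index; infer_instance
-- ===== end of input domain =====

-- ===== PORT A =====
-- B splits A's single combined pass into a first-index-building pass and a separate emit pass (alternative decomposition, same cost); return value only, no mutation observable.

-- A's loop body: skip None and already-seen ids; else mark seen and maybe write mapping[idx]
def stepA (t : Int) (st : List (Option Int) × PySem.Dict Int Bool) (p : Int × Option Int) :
    List (Option Int) × PySem.Dict Int Bool :=
  match p.2 with
  | none => st
  | some w =>
    if st.2.contains w then st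
    else
      let seen := st.2.insert w true
      if w ≥ t then (PySem.List.pySetD st.1 p.1 (some (w - t)), seen)
      else (st.1, seen)

def build_pos_to_word_index (word_ids : List (Option Int)) (text_start_combined : Int) : List (Option Int) :=
  ((PySem.List.enumerate word_ids).foldl (stepA text_start_combined)
    (List.replicate word_ids.length (none : Option Int), (PySem.Dict.empty : PySem.Dict Int Bool))).1

-- ===== PORT B =====
-- first pass: record the index of the first occurrence of each non-None word id
def stepB (d : PySem.Dict Int Int) (p : Int × Option Int) : PySem.Dict Int Int :=
  match p.2 with
  | none => d
  | some w => if d.contains w then d else d.insert w p.1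

-- emit pass body: write word_id - t at the recorded index when word_id >= t
def emitB (t : Int) (m : List (Option Int)) (q : Int × Int) : List (Option Int) :=
  if q.1 ≥ t then PySem.List.pySetD m q.2 (some (q.1 - t)) else m

def build_pos_to_word_index_alt (word_ids : List (Option Int)) (text_start_combined : Int) : List (Option Int) :=
  let first_idx := (PySem.List.enumerate word_ids).foldl stepB (PySem.Dict.empty : PySem.Dict Int Int)
  first_idx.items.foldl (emitB text_start_combined) (List.replicate word_ids.length (none : Option Int))

-- ===== PRECONDITION & SPEC =====
def Spec_build_pos_to_word_index (word_ids : List (Option Int)) (text_start_combined : Int) (out : List (Option Int)) : Prop := out = build_pos_to_word_index_alt word_ids text_start_combined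
instance (word_ids : List (Option Int)) (text_start_combined : Int) (out : List (Option Int)) : Decidable (Spec_build_pos_to_word_index word_ids text_start_combined out) := by unfold Spec_build_pos_to_word_index; infer_instance

-- ===== CLAIM (what is proved, stated in full; the proofs are below) =====
def Claim_equal_build_pos_to_word_index : Prop := ∀ (word_ids : List (Option Int)) (text_start_combined : Int), Dom_build_pos_to_word_index word_ids text_start_combined → Spec_build_pos_to_word_index word_ids text_start_combined (build_pos_to_word_index word_ids text_start_combined)

-- ===== LEMMAS AND PROOFS =====

-- Main invariant: running A's combined loop from (m, db) equals recording first
-- indices from di and then emitting the NEWLY appended items onto m, provided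
-- db and di contain the same keys.
theorem stepA_foldl_eq (t : Int) :
    ∀ (l : List (Int × Option Int)) (m : List (Option Int))
      (db : PySem.Dict Int Bool) (di : PySem.Dict Int Int),
      (∀ w, db.contains w = di.contains w) →
      ∃ extra, (l.foldl stepB di).items = di.items ++ extra ∧
        (l.foldl (stepA t) (m, db)).1 = extra.foldl (emitB t) m := by
  intro l
  induction l with
  | nil => intro m db di _; exact ⟨[], by simp, rfl⟩
  | cons p tail ih =>
    intro m db di h
    obtain ⟨i, w⟩ := p
    match w with
    | none =>
      simpa [stepA, stepB] using ih m db di h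
    | some w =>
      by_cases hc : di.contains w = true
      · have hb : db.contains w = true := by rw [h]; exact hc
        simpa [stepA, stepB, hb, hc] using ih m db di h
      · have hb : db.contains w = false := by rw [h]; simpa using hc
        have hc' : di.contains w = false := by simpa using hc
        have h' : ∀ w', (db.insert w true).contains w' = (di.insert w i).contains w' := by
          intro w'
          rw [PySem.Dict.contains_insert, PySem.Dict.contains_insert, h]
        obtain ⟨extra, hitems, hres⟩ := ih (emitB t m (w, i)) (db.insert w true) (di.insert w i) h'
        refine ⟨(w, i) :: extra, ?_, ?_⟩
        · rw [List.foldl_cons]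
          simp only [stepB, hc', Bool.false_eq_true, if_false]
          rw [hitems, PySem.Dict.items_insert_of_not_contains (h := hc')]
          simp
        · rw [List.foldl_cons, List.foldl_cons]
          simp only [stepA, hb, Bool.false_eq_true, if_false]
          rw [← hres]
          by_cases hw : w ≥ t <;> simp [emitB, hw]

-- ===== VERDICT (by name: the statement is the Claim_ definition above) =====
theorem build_pos_to_word_index_spec : Claim_equal_build_pos_to_word_index := by
  intro word_ids t _
  unfold Spec_build_pos_to_word_index build_pos_to_word_index build_pos_to_word_index_alt
  obtain ⟨extra, hitems, hres⟩ :=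
    stepA_foldl_eq t (PySem.List.enumerate word_ids)
      (List.replicate word_ids.length (none : Option Int))
      PySem.Dict.empty PySem.Dict.empty (fun w => rfl)
  rw [hres]
  congr 1
  simpa using hitems.symm
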